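-- pv_equiv track=rewrite | github.com/yakov0/VKR | MatsuiLib.py | MaxColStep
-- ===== SOURCE A (Python) =====
-- def MaxColStep(K1,K2):
--     # Длина списков должна совпадать
--     if len(K1) != len(K2):
--         return -1
--     max_step = 0
--     maxcolsteps = 0
--     for i in range(len(K1)):
--         if K1[i] != K2[i]:
--             if max_step <= 2:
--                 maxcolsteps += 1
--                 max_step += 1
--             else:
--                 break
--         else:
--             if max_step <= 2:
--                 maxcolsteps += 1
--             else:
--                 break
--
--     return maxcolsteps
-- ===== SOURCE B (Python) =====
-- def MaxColStep(K1, K2):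
--     if len(K1) != len(K2):
--         return -1
--     mm = [i for i, (a, b) in enumerate(zip(K1, K2)) if a != b]
--     return mm[2] + 1 if len(mm) >= 3 else len(K1)
-- ===== Notes on version B (the rewrite author's own statement) =====
-- stated objective: simpler
-- what changed: Replaces the stateful scan with max_step/break bookkeeping by building the list of mismatch positions in one comprehension and selecting the third mismatch's cutoff (or the full length) arithmetically.
import Mathlib
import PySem

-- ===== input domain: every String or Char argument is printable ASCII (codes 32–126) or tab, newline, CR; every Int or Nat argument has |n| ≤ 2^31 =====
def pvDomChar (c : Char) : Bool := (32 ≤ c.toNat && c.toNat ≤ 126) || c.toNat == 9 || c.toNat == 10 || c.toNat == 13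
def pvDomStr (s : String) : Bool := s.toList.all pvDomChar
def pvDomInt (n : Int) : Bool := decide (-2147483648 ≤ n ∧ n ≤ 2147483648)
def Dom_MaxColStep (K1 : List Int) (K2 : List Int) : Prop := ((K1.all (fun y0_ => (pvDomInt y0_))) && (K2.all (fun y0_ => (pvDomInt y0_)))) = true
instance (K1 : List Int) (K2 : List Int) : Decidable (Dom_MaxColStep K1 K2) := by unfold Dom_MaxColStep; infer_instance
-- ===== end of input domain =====

-- B replaces A's stateful scan (max_step counter + break) by collecting the mismatch
-- positions once and selecting the third mismatch's cutoff arithmetically (objective: simpler).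

-- ===== PORT A =====
-- A's for-loop over i in range(len(K1)) with the break, as structural recursion over
-- both lists in step (the lengths are equal when the loop runs); ms = max_step, cnt = maxcolsteps.
def loopA : List Int → List Int → Nat → Int → Int
  | a :: as, b :: bs, ms, cnt =>
    if a ≠ b then
      if ms ≤ 2 then loopA as bs (ms + 1) (cnt + 1) else cnt
    else
      if ms ≤ 2 then loopA as bs ms (cnt + 1) else cnt
  | _, _, _, cnt => cnt

def MaxColStep (K1 : List Int) (K2 : List Int) : Int :=
  if K1.length ≠ K2.length then -1
  else loopA K1 K2 0 0

-- ===== PORT B =====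
-- mm = [i for i,(a,b) in enumerate(zip(K1,K2)) if a != b]; mm[2] is guarded by len(mm) >= 3,
-- so the getD default is never used.
def MaxColStep_alt (K1 : List Int) (K2 : List Int) : Int :=
  if K1.length ≠ K2.length then -1
  else
    let mm := ((PySem.List.enumerate (K1.zip K2) 0).filter (fun p => decide (p.2.1 ≠ p.2.2))).map (fun p => p.1)
    if 3 ≤ mm.length then mm[2]?.getD 0 + 1 else (K1.length : Int)

-- ===== PRECONDITION & SPEC =====
def Spec_MaxColStep (K1 : List Int) (K2 : List Int) (out : Int) : Prop := out = MaxColStep_alt K1 K2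
instance (K1 : List Int) (K2 : List Int) (out : Int) : Decidable (Spec_MaxColStep K1 K2 out) := by unfold Spec_MaxColStep; infer_instance

-- ===== CLAIM (what is proved, stated in full; the proofs are below) =====
def Claim_equal_MaxColStep : Prop := ∀ (K1 : List Int) (K2 : List Int), Dom_MaxColStep K1 K2 → Spec_MaxColStep K1 K2 (MaxColStep K1 K2)

-- ===== LEMMAS AND PROOFS =====

-- g k as bs: number of steps A's loop still performs when k mismatches remain allowed
-- (k = 3 - max_step); 0 steps once the budget is exhausted.
def g : Nat → List Int → List Int → Int
  | 0, _, _ => 0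
  | k + 1, a :: as, b :: bs => if a ≠ b then 1 + g k as bs else 1 + g (k + 1) as bs
  | _ + 1, _, _ => 0

-- the mismatch-position list of B, with a general enumeration start
def mmFrom (s : Int) (as bs : List Int) : List Int :=
  ((PySem.List.enumerate (as.zip bs) s).filter (fun p => decide (p.2.1 ≠ p.2.2))).map (fun p => p.1)

theorem mmFrom_cons (s : Int) (a b : Int) (as bs : List Int) :
    mmFrom s (a :: as) (b :: bs) =
      (if a ≠ b then [s] else []) ++ mmFrom (s + 1) as bs := by
  simp only [mmFrom, List.zip_cons_cons, PySem.List.enumerate_cons, List.filter_cons]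
  by_cases h : a = b <;> simp [h]

theorem g_nil_left (k : Nat) (bs : List Int) : g k [] bs = 0 := by
  cases k <;> cases bs <;> simp [g]

theorem g_nil_right (k : Nat) (a : Int) (as : List Int) : g k (a :: as) [] = 0 := by
  cases k <;> simp [g]

theorem loopA_eq_g (as : List Int) : ∀ (bs : List Int) (ms : Nat) (cnt : Int), ms ≤ 3 →
    loopA as bs ms cnt = cnt + g (3 - ms) as bs := by
  induction as with
  | nil => intro bs ms cnt _; cases bs <;> simp [loopA, g_nil_left]
  | cons a as ih =>
    intro bs ms cnt hms
    cases bs with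
    | nil => rw [show loopA (a :: as) [] ms cnt = cnt from rfl, g_nil_right]; ring
    | cons b bs =>
      simp only [loopA]
      by_cases hab : a = b
      · rw [if_neg (by simp [hab])]
        rcases Nat.lt_or_ge ms 3 with h | h
        · rw [if_pos (by omega), ih bs ms (cnt + 1) hms]
          have h3 : 3 - ms = (3 - ms - 1) + 1 := by omega
          rw [h3]
          simp only [g]
          rw [if_neg (by simp [hab])]
          have h4 : (3 - ms - 1) + 1 = 3 - ms := by omega
          rw [h4]; ring
        · rw [if_neg (by omega)]
          have h0 : 3 - ms = 0 := by omega
          rw [h0]; simp [g]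
      · rw [if_pos (by simp [hab])]
        rcases Nat.lt_or_ge ms 3 with h | h
        · rw [if_pos (by omega), ih bs (ms + 1) (cnt + 1) (by omega)]
          have h3 : 3 - ms = (3 - (ms + 1)) + 1 := by omega
          rw [h3]
          simp only [g]
          rw [if_pos (by simp [hab])]
          ring
        · rw [if_neg (by omega)]
          have h0 : 3 - ms = 0 := by omega
          rw [h0]; simp [g]

theorem g_eq_mm (as : List Int) : ∀ (bs : List Int) (k : Nat) (s : Int), 1 ≤ k →
    g k as bs =
      if k ≤ (mmFrom s as bs).length then (mmFrom s as bs)[k - 1]?.getD 0 - s + 1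
      else ((as.zip bs).length : Int) := by
  induction as with
  | nil =>
    intro bs k s hk
    have hmm : mmFrom s [] bs = [] := by simp [mmFrom]
    rw [hmm, if_neg (by simp; omega), g_nil_left]
    simp
  | cons a as ih =>
    intro bs k s hk
    cases bs with
    | nil =>
      have hmm : mmFrom s (a :: as) [] = [] := by simp [mmFrom]
      rw [hmm, if_neg (by simp; omega), g_nil_right]
      simp
    | cons b bs =>
      rw [mmFrom_cons]
      by_cases hab : a = b
      · -- match: position dropped
        have hmm : (if a ≠ b then [s] else []) = ([] : List Int) := by simp [hab]
        rw [hmm, List.nil_append]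
        cases k with
        | zero => omega
        | succ k =>
          simp only [g]
          rw [if_neg (by simp [hab]), ih bs (k + 1) (s + 1) (by omega)]
          by_cases hlen : k + 1 ≤ (mmFrom (s + 1) as bs).length
          · rw [if_pos hlen, if_pos hlen]; ring
          · rw [if_neg hlen, if_neg hlen]
            simp only [List.zip_cons_cons, List.length_cons]
            push_cast; ring
      · -- mismatch: position s is recorded first
        have hmm : (if a ≠ b then [s] else []) = [s] := by simp [hab]
        rw [hmm, List.singleton_append]
        cases k with
        | zero => omega
        | succ k =>
          simp only [g]
          rw [if_pos hab]
          cases k with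
          | zero =>
            -- budget 1: the loop stops right after this mismatch
            rw [if_pos (by simp)]
            simp [g]
          | succ k =>
            rw [ih bs (k + 1) (s + 1) (by omega)]
            simp only [Nat.add_sub_cancel]
            by_cases hlen : k + 1 ≤ (mmFrom (s + 1) as bs).length
            · rw [if_pos hlen, if_pos (by simp; omega), List.getElem?_cons_succ]
              ring
            · rw [if_neg hlen, if_neg (by simp; omega)]
              simp only [List.zip_cons_cons, List.length_cons]
              push_cast; ring

-- ===== VERDICT (by name: the statement is the Claim_ definition above) =====
theorem MaxColStep_spec : Claim_equal_MaxColStep := by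
  unfold Claim_equal_MaxColStep
  intro K1 K2 _
  unfold Spec_MaxColStep MaxColStep MaxColStep_alt
  by_cases hlen : K1.length = K2.length
  · rw [if_neg (by simp [hlen]), if_neg (by simp [hlen])]
    rw [loopA_eq_g K1 K2 0 0 (by omega)]
    rw [g_eq_mm K1 K2 3 0 (by omega)]
    have hzip : (K1.zip K2).length = K1.length := by simp [hlen]
    simp only [mmFrom, hzip, sub_zero, zero_add]
  · rw [if_pos (by simp [hlen]), if_pos (by simp [hlen])]
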